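-- pv_equiv track=rewrite | github.com/mrizo-maruf/yolo_sgg | isaacsim_utils/visualize_rerun_isaacsim.py | _select_frames
-- ===== SOURCE A (Python) =====
-- from typing import List, Optional, Sequence, Set
--
-- def _select_frames(
--     frame_indices: Sequence[int],
--     frame_start: Optional[int],
--     frame_end: Optional[int],
--     frame_step: int,
-- ) -> List[int]:
--     out = []
--     for frame_idx in frame_indices:
--         if frame_start is not None and frame_idx < frame_start:
--             continue
--         if frame_end is not None and frame_idx > frame_end:
--             continue
--         out.append(frame_idx)
--     return out[:: max(1, frame_step)]
-- ===== SOURCE B (Python) =====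
-- def _select_frames(frame_indices, frame_start, frame_end, frame_step):
--     step = max(1, frame_step)
--     out = []
--     kept = 0
--     for frame_idx in frame_indices:
--         if frame_start is not None and frame_idx < frame_start:
--             continue
--         if frame_end is not None and frame_idx > frame_end:
--             continue
--         if kept % step == 0:
--             out.append(frame_idx)
--         kept += 1
--     return out
-- ===== Notes on version B (the rewrite author's own statement) =====
-- stated objective: alternative
-- what changed: Fuses the filter pass and the subsequent step-slice into one loop: a running counter of surviving frames replaces building the intermediate filtered list and slicing it with out[::max(1, frame_step)].
import Mathlib
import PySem

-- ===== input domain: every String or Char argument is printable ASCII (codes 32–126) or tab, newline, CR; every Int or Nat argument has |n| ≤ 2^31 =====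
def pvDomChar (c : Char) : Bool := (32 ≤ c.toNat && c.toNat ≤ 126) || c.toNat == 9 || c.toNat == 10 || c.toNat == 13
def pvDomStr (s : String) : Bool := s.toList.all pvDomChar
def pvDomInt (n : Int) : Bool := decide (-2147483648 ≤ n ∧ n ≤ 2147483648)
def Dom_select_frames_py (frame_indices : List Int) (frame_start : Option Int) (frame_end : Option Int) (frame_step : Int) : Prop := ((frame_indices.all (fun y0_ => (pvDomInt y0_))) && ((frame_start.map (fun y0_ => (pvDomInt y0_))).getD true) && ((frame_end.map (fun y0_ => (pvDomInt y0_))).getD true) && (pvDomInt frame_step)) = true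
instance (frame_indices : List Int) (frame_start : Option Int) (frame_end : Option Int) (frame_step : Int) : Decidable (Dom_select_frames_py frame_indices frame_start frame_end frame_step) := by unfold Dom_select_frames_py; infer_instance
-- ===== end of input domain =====

-- B fuses the filter pass and the step-slice into one loop with a running counter of surviving frames (same O(n) cost, no intermediate list).


-- ===== PORT A =====
-- hand port of Python's out[::k]: exact for k ≥ 1 (elements at indices 0, k, 2k, …);
-- A only ever calls it with k = max(1, frame_step) ≥ 1.
def pvStepSlice (k : Nat) : List Int → List Int
  | [] => []
  | x :: xs => x :: pvStepSlice k (xs.drop (k - 1))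
termination_by xs => xs.length
decreasing_by simp

def select_frames_py (frame_indices : List Int) (frame_start : Option Int) (frame_end : Option Int) (frame_step : Int) : List Int :=
  let out := frame_indices.foldl (fun acc frame_idx =>
    if (match frame_start with | some s => decide (frame_idx < s) | none => false) then acc
    else if (match frame_end with | some e => decide (frame_idx > e) | none => false) then acc
    else acc ++ [frame_idx]) []
  pvStepSlice (max 1 frame_step).toNat out

-- ===== PORT B =====
def pvAltGo (frame_start frame_end : Option Int) (step : Int) : List Int → Int → List Int
  | [], _ => []
  | frame_idx :: rest, kept =>
    if (match frame_start with | some s => decide (frame_idx < s) | none => false) then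
      pvAltGo frame_start frame_end step rest kept
    else if (match frame_end with | some e => decide (frame_idx > e) | none => false) then
      pvAltGo frame_start frame_end step rest kept
    else if PySem.Int.mod kept step = 0 then
      frame_idx :: pvAltGo frame_start frame_end step rest (kept + 1)
    else
      pvAltGo frame_start frame_end step rest (kept + 1)

def select_frames_py_alt (frame_indices : List Int) (frame_start : Option Int) (frame_end : Option Int) (frame_step : Int) : List Int :=
  pvAltGo frame_start frame_end (max 1 frame_step) frame_indices 0

-- ===== PRECONDITION & SPEC =====
def Spec_select_frames_py (frame_indices : List Int) (frame_start : Option Int) (frame_end : Option Int) (frame_step : Int) (out : List Int) : Prop := out = select_frames_py_alt frame_indices frame_start frame_end frame_step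
instance (frame_indices : List Int) (frame_start : Option Int) (frame_end : Option Int) (frame_step : Int) (out : List Int) : Decidable (Spec_select_frames_py frame_indices frame_start frame_end frame_step out) := by unfold Spec_select_frames_py; infer_instance

-- ===== CLAIM (what is proved, stated in full; the proofs are below) =====
def Claim_equal_select_frames_py : Prop := ∀ (frame_indices : List Int) (frame_start : Option Int) (frame_end : Option Int) (frame_step : Int), Dom_select_frames_py frame_indices frame_start frame_end frame_step → Spec_select_frames_py frame_indices frame_start frame_end frame_step (select_frames_py frame_indices frame_start frame_end frame_step)

-- ===== LEMMAS AND PROOFS =====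

-- the bound test both programs apply to a frame index
def pvKeep (frame_start frame_end : Option Int) (x : Int) : Bool :=
  !(match frame_start with | some s => decide (x < s) | none => false) &&
  !(match frame_end with | some e => decide (x > e) | none => false)

theorem pvStepSlice_nil (k : Nat) : pvStepSlice k [] = [] := by
  rw [pvStepSlice.eq_def]

theorem pvStepSlice_cons (k : Nat) (x : Int) (xs : List Int) :
    pvStepSlice k (x :: xs) = x :: pvStepSlice k (xs.drop (k - 1)) := by
  rw [pvStepSlice.eq_def]

-- A's accumulating loop builds acc ++ the filtered list
theorem pvFoldA (fs fe : Option Int) : ∀ (xs : List Int) (acc : List Int),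
    xs.foldl (fun acc x =>
      if (match fs with | some s => decide (x < s) | none => false) then acc
      else if (match fe with | some e => decide (x > e) | none => false) then acc
      else acc ++ [x]) acc = acc ++ xs.filter (pvKeep fs fe) := by
  intro xs
  induction xs with
  | nil => simp
  | cons x xs ih =>
    intro acc
    cases h1 : (match fs with | some s => decide (x < s) | none => false) with
    | true => simp [List.foldl, h1, pvKeep, ih]
    | false =>
      cases h2 : (match fe with | some e => decide (x > e) | none => false) with
      | true => simp [List.foldl, h1, h2, pvKeep, ih]
      | false => simp [List.foldl, h1, h2, pvKeep, ih]

-- B's loop restricted to the counter only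
def pvGoF (step : Int) : List Int → Int → List Int
  | [], _ => []
  | y :: ys, kept =>
    if PySem.Int.mod kept step = 0 then y :: pvGoF step ys (kept + 1)
    else pvGoF step ys (kept + 1)

theorem pvGoFilter (fs fe : Option Int) (k : Int) : ∀ (xs : List Int) (kept : Int),
    pvAltGo fs fe k xs kept = pvGoF k (xs.filter (pvKeep fs fe)) kept := by
  intro xs
  induction xs with
  | nil => intro kept; simp [pvAltGo, pvGoF]
  | cons x xs ih =>
    intro kept
    cases h1 : (match fs with | some s => decide (x < s) | none => false) with
    | true => simp [pvAltGo, h1, pvKeep, ih]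
    | false =>
      cases h2 : (match fe with | some e => decide (x > e) | none => false) with
      | true => simp [pvAltGo, h1, h2, pvKeep, ih]
      | false => simp [pvAltGo, h1, h2, pvKeep, pvGoF, ih]

-- counter loop, rephrased with an explicit "skip d elements, then take one" state
def pvAux (k : Nat) : List Int → Nat → List Int
  | [], _ => []
  | y :: ys, 0 => y :: pvAux k ys (k - 1)
  | _ :: ys, d + 1 => pvAux k ys d

theorem pvAux_eq_slice (k : Nat) (hk : 1 ≤ k) : ∀ (ys : List Int) (d : Nat), d < k →
    pvAux k ys d = pvStepSlice k (ys.drop d) := by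
  intro ys
  induction ys with
  | nil => intro d _; cases d <;> simp [pvAux, pvStepSlice_nil]
  | cons y ys ih =>
    intro d hd
    cases d with
    | zero => simp [pvAux, pvStepSlice_cons, ih (k - 1) (by omega)]
    | succ d' => simp [pvAux, ih d' (by omega)]

theorem pvGoF_eq_aux (k : Int) (hk : 1 ≤ k) : ∀ (ys : List Int) (q r : Int), 0 ≤ r → r < k →
    pvGoF k ys (q * k + r) = pvAux k.toNat ys (if r = 0 then 0 else (k - r).toNat) := by
  intro ys
  induction ys with
  | nil => intro q r _ _; simp only [pvGoF, pvAux]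
  | cons y ys ih =>
    intro q r hr0 hrk
    have hmod : PySem.Int.mod (q * k + r) k = r := by
      rw [PySem.Int.mod_eq_emod_of_pos (by omega), add_comm, mul_comm, Int.add_mul_emod_self_left]
      exact Int.emod_eq_of_lt hr0 hrk
    by_cases hr : r = 0
    · subst hr
      have hmod' : PySem.Int.mod (q * k) k = 0 := by simpa using hmod
      have hLHS : pvGoF k (y :: ys) (q * k + 0) = y :: pvGoF k ys (q * k + 0 + 1) := by
        simp [pvGoF, hmod']
      have hRHS : pvAux k.toNat (y :: ys) (if (0 : Int) = 0 then 0 else (k - 0).toNat) =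
          y :: pvAux k.toNat ys (k.toNat - 1) := by
        simp [pvAux]
      rw [hLHS, hRHS]
      by_cases hk1 : k = 1
      · subst hk1
        rw [show q * 1 + 0 + 1 = (q + 1) * 1 + 0 by ring, ih (q + 1) 0 le_rfl (by omega)]
        simp
      · rw [show q * k + 0 + 1 = q * k + 1 by ring, ih q 1 (by omega) (by omega)]
        rw [if_neg one_ne_zero, show (k - 1).toNat = k.toNat - 1 by omega]
    · have hmodne : ¬ PySem.Int.mod (q * k + r) k = 0 := by rw [hmod]; exact hr
      simp only [pvGoF, if_neg hmodne, if_neg hr]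
      obtain ⟨d', hd'⟩ : ∃ d', (k - r).toNat = d' + 1 := ⟨(k - r).toNat - 1, by omega⟩
      rw [hd']
      simp only [pvAux]
      by_cases hre : r + 1 = k
      · have h1 : q * k + r + 1 = (q + 1) * k + 0 := by rw [← hre]; ring
        rw [h1, ih (q + 1) 0 le_rfl (by omega)]
        have h2 : (if (0 : Int) = 0 then (0 : Nat) else (k - 0).toNat) = d' := by simp; omega
        rw [h2]
      · have h1 : q * k + r + 1 = q * k + (r + 1) := by ring
        rw [h1, ih q (r + 1) (by omega) (by omega)]
        have h2 : (if r + 1 = 0 then (0 : Nat) else (k - (r + 1)).toNat) = d' := by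
          rw [if_neg (by omega)]; omega
        rw [h2]

-- ===== VERDICT (by name: the statement is the Claim_ definition above) =====
theorem select_frames_py_spec : Claim_equal_select_frames_py := by
  intro fi fs fe st _
  unfold Spec_select_frames_py select_frames_py select_frames_py_alt
  have hk : (1 : Int) ≤ max 1 st := le_max_left 1 st
  simp only [pvFoldA fs fe fi [], pvGoFilter fs fe (max 1 st) fi 0, List.nil_append]
  have h0 : (0 : Int) = 0 * (max 1 st) + 0 := by ring
  rw [h0, pvGoF_eq_aux (max 1 st) hk _ 0 0 le_rfl (by omega)]
  rw [if_pos rfl, pvAux_eq_slice (max 1 st).toNat (by omega) _ 0 (by omega), List.drop_zero]
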